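-- pv_equiv track=rewrite | github.com/Yerinnnn/Algorithm | 백준/Silver/20922. 겹치는 건 싫어/겹치는 건 싫어.py | max_length_with_limit
-- ===== SOURCE A (Python) =====
-- from collections import defaultdict
--
-- def max_length_with_limit(arr, K):
--     count = defaultdict(int)  # 각 숫자의 등장 횟수를 기록할 딕셔너리, 기본값이 0인 defaultdict로 초기화
--     max_length = 0  # 최대 부분 배열 길이를 저장할 변수, 초기값은 0
--     left = 0  # 슬라이딩 윈도우의 왼쪽 끝을 가리키는 포인터, 초기값은 0
--
--     # 슬라이딩 윈도우를 이용하여 배열의 각 요소를 순차적으로 처리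
--     for right in range(len(arr)):
--         count[arr[right]] += 1  # 현재 숫자의 등장 횟수를 증가시킴
--
--         # 특정 숫자의 등장 횟수가 K를 초과하는 경우, 조건을 만족시킬 때까지 윈도우의 왼쪽 끝을 이동
--         while count[arr[right]] > K:
--             count[arr[left]] -= 1  # 왼쪽 끝 숫자의 등장 횟수를 감소
--             left += 1  # 윈도우의 왼쪽 끝을 오른쪽으로 한 칸 이동
--
--         # 현재 윈도우의 길이 계산 및 최대 길이 갱신
--         max_length = max(max_length, right - left + 1)
--
--     return max_length  # 조건을 만족하는 가장 긴 부분 배열의 길이를 반환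
-- ===== SOURCE B (Python) =====
-- from collections import defaultdict
--
-- def max_length_with_limit(arr, K):
--     pos = defaultdict(list)  # value -> list of indices where it occurred so far
--     max_length = 0
--     left = 0
--     for right, v in enumerate(arr):
--         p = pos[v]
--         p.append(right)
--         if len(p) > K:
--             # jump directly past the (K+1)-th-from-last occurrence of v
--             left = max(left, p[-(K + 1)] + 1)
--         max_length = max(max_length, right - left + 1)
--     return max_length
-- ===== Notes on version B (the rewrite author's own statement) =====
-- stated objective: alternative
-- what changed: Replaces the count-dictionary sliding window with its inner while-loop (decrementing counts one step at a time) by a dictionary of per-value occurrence-index lists: when a value has more than K stored occurrences the left edge jumps directly past its (K+1)-th-from-last occurrence via left = max(left, pos[v][-(K+1)]+1), so there is no inner loop and no count decrementing at all.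
import Mathlib
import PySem

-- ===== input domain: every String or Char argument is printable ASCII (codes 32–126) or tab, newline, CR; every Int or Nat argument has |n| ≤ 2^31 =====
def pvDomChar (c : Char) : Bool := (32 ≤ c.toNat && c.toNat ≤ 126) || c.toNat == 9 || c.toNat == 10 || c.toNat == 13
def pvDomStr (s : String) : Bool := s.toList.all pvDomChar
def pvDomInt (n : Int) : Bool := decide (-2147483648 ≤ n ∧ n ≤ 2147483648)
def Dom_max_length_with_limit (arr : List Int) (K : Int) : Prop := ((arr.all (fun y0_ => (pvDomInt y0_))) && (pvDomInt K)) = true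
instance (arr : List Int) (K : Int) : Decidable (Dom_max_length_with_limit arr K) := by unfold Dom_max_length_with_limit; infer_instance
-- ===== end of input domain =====

-- B replaces A's count-dict sliding window (inner while loop decrementing counts) by per-value
-- occurrence-index lists: the left edge jumps directly past the (K+1)-th-from-last occurrence,
-- so there is no inner loop (objective: alternative O(n) algorithm, no inner loop).

-- ===== PORT A =====
-- the inner 'while count[arr[right]] > K: count[arr[left]] -= 1; left += 1' loop;
-- the 'none' branch is where Python raises IndexError on arr[left] (outside Pre_)
def pvAWhile (arr : List Int) (K x : Int) (count : PySem.Dict Int Int) (left : Int) :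
    PySem.Dict Int Int × Int :=
  if K < count.getD x 0 then
    match h : PySem.List.pyGet? arr left with
    | some y => pvAWhile arr K x (count.modify y 0 (· - 1)) (left + 1)
    | none => (count, left)
  else (count, left)
termination_by ((arr.length : Int) - left).toNat
decreasing_by
  have hin : PySem.Raise.InRange arr.length left := by
    by_contra hc
    rw [← PySem.List.pyGet?_eq_none_iff] at hc
    simp [hc] at h
  rcases hin with ⟨_, h2⟩
  omega

def max_length_with_limit (arr : List Int) (K : Int) : Int :=
  let st := (PySem.List.pyRange 0 (arr.length : Int) 1).foldl
    (fun (s : PySem.Dict Int Int × Int × Int) right =>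
      let x := PySem.List.pyGetD arr right 0
      let count := s.1.modify x 0 (· + 1)
      let wres := pvAWhile arr K x count s.2.2
      (wres.1, max s.2.1 (right - wres.2 + 1), wres.2))
    (PySem.Dict.empty, 0, 0)
  st.2.1

-- ===== PORT B =====
-- the 'none' branch of the index pos[v][-(K+1)] is where Python would raise (outside Pre_)
def max_length_with_limit_alt (arr : List Int) (K : Int) : Int :=
  let st := (PySem.List.enumerate arr 0).foldl
    (fun (s : PySem.Dict Int (List Int) × Int × Int) rv =>
      let p := s.1.getD rv.2 [] ++ [rv.1]
      let pos := s.1.insert rv.2 p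
      let left :=
        if K < (p.length : Int) then
          (PySem.List.pyGet? p (-(K + 1))).elim s.2.2 (fun q => max s.2.2 (q + 1))
        else s.2.2
      (pos, max s.2.1 (rv.1 - left + 1), left))
    (PySem.Dict.empty, 0, 0)
  st.2.1

-- ===== PRECONDITION & SPEC =====
-- Pre_ excludes only the inputs on which A raises: for a nonempty arr and K < 0 the while
-- loop never terminates normally and A raises IndexError on arr[left].
def Pre_max_length_with_limit (arr : List Int) (K : Int) : Prop := arr = [] ∨ 0 ≤ K
instance (arr : List Int) (K : Int) : Decidable (Pre_max_length_with_limit arr K) := by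
  unfold Pre_max_length_with_limit; infer_instance

def pvWitness_max_length_with_limit : List Int × Int := ([1, 2, 1, 1, 2], 1)

def Spec_max_length_with_limit (arr : List Int) (K : Int) (out : Int) : Prop :=
  out = max_length_with_limit_alt arr K
instance (arr : List Int) (K : Int) (out : Int) : Decidable (Spec_max_length_with_limit arr K out) := by
  unfold Spec_max_length_with_limit; infer_instance

-- ===== CLAIM (what is proved, stated in full; the proofs are below) =====
def Claim_equal_max_length_with_limit : Prop := ∀ (arr : List Int) (K : Int),
  Dom_max_length_with_limit arr K → Pre_max_length_with_limit arr K →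
  Spec_max_length_with_limit arr K (max_length_with_limit arr K)

-- ===== LEMMAS AND PROOFS =====

-- occurrences of value v among the first m indices of arr
def pvOccs (arr : List Int) (v : Int) (m : Nat) : List Nat :=
  (List.range m).filter (fun i => decide (arr.getD i 0 = v))

-- number of occurrences of w in arr[l:m] (the window count A's dict holds)
def pvW (arr : List Int) (l : Nat) : Nat → Int → Nat
  | 0, _ => 0
  | m + 1, w => pvW arr l m w + (if l ≤ m ∧ arr.getD m 0 = w then 1 else 0)

-- the left edge forced by the element at index r
def pvJump (arr : List Int) (K : Int) (r : Nat) : Nat :=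
  let s := pvOccs arr (arr.getD r 0) (r + 1)
  if K.toNat + 1 ≤ s.length then s.getD (s.length - (K.toNat + 1)) 0 + 1 else 0

-- the common left-pointer and max-length sequences
def pvSL (arr : List Int) (K : Int) : Nat → Nat
  | 0 => 0
  | r + 1 => max (pvSL arr K r) (pvJump arr K r)

def pvSM (arr : List Int) (K : Int) : Nat → Int
  | 0 => 0
  | r + 1 => max (pvSM arr K r) ((r : Int) - (pvSL arr K (r + 1) : Int) + 1)

-- ---- helper definitions for the proofs ----

-- the loop body of port A, named for the invariant proof (identical to the port's lambda)
def pvStepA (arr : List Int) (K : Int) (s : PySem.Dict Int Int × Int × Int) (right : Int) :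
    PySem.Dict Int Int × Int × Int :=
  let x := PySem.List.pyGetD arr right 0
  let count := s.1.modify x 0 (· + 1)
  let wres := pvAWhile arr K x count s.2.2
  (wres.1, max s.2.1 (right - wres.2 + 1), wres.2)

def pvFoldA (arr : List Int) (K : Int) (r : Nat) : PySem.Dict Int Int × Int × Int :=
  ((List.range r).map (fun (k : Nat) => (k : Int))).foldl (pvStepA arr K) (PySem.Dict.empty, 0, 0)

-- the loop body of port B, named for the invariant proof (identical to the port's lambda)
def pvStepB (K : Int) (s : PySem.Dict Int (List Int) × Int × Int) (rv : Int × Int) :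
    PySem.Dict Int (List Int) × Int × Int :=
  let p := s.1.getD rv.2 [] ++ [rv.1]
  let pos := s.1.insert rv.2 p
  let left :=
    if K < (p.length : Int) then
      (PySem.List.pyGet? p (-(K + 1))).elim s.2.2 (fun q => max s.2.2 (q + 1))
    else s.2.2
  (pos, max s.2.1 (rv.1 - left + 1), left)

def pvFoldB (arr : List Int) (K : Int) (r : Nat) : PySem.Dict Int (List Int) × Int × Int :=
  ((List.range r).map (fun (k : Nat) => ((k : Int), arr.getD k 0))).foldl (pvStepB K) (PySem.Dict.empty, 0, 0)

-- ---- basic lemmas ----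

theorem pvW_zero_of_ge (arr : List Int) (l : Nat) (w : Int) :
    ∀ m, m ≤ l → pvW arr l m w = 0 := by
  intro m
  induction m with
  | zero => intro _; rfl
  | succ m ih =>
    intro h
    rw [pvW, ih (by omega)]
    have : ¬ (l ≤ m ∧ arr.getD m 0 = w) := by omega
    rw [if_neg this]

theorem pvOccs_succ (arr : List Int) (v : Int) (m : Nat) :
    pvOccs arr v (m + 1) =
      pvOccs arr v m ++ (if arr.getD m 0 = v then [m] else []) := by
  rw [pvOccs, List.range_succ, List.filter_append, pvOccs]
  by_cases h : arr.getD m 0 = v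
  · rw [if_pos h]
    simp only [List.getD_eq_getElem?_getD] at h
    simp [h]
  · rw [if_neg h]
    simp only [List.getD_eq_getElem?_getD] at h
    simp [h]

theorem pvW_eq_countP (arr : List Int) (l : Nat) (v : Int) (m : Nat) :
    pvW arr l m v = (pvOccs arr v m).countP (fun i => decide (l ≤ i)) := by
  induction m with
  | zero => rfl
  | succ m ih =>
    rw [pvW, ih, pvOccs_succ, List.countP_append]
    by_cases h : arr.getD m 0 = v
    · rw [if_pos h]
      by_cases hl : l ≤ m
      · rw [if_pos ⟨hl, h⟩]; simp [hl]
      · rw [if_neg (by tauto)]; simp [hl]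
    · rw [if_neg h, if_neg (by tauto)]; simp

theorem pvOccs_sorted (arr : List Int) (v : Int) (m : Nat) :
    (pvOccs arr v m).Pairwise (· < ·) :=
  (List.pairwise_lt_range).filter _

theorem pvOccs_mem_lt (arr : List Int) (v : Int) (m i : Nat) (h : i ∈ pvOccs arr v m) : i < m := by
  simp only [pvOccs, List.mem_filter, List.mem_range] at h
  exact h.1

-- counting elements ≥ l in a strictly increasing list, against its (len-m)-th element
theorem pvSortedCount (s : List Nat) (hs : s.Pairwise (· < ·)) (m : Nat) (hm : 1 ≤ m)
    (hlen : m ≤ s.length) (l : Nat) :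
    (s.countP (fun i => decide (l ≤ i)) ≤ m - 1) ↔ s.getD (s.length - m) 0 + 1 ≤ l := by
  have hmono := List.pairwise_iff_getElem.1 hs
  set j := s.length - m with hj
  have hjlt : j < s.length := by omega
  have hgetD : s.getD j 0 = s[j] := List.getD_eq_getElem s 0 hjlt
  rw [hgetD]
  constructor
  · intro hcount
    by_contra hcon
    rw [not_le] at hcon
    have hl : l ≤ s[j] := by omega
    -- all elements of the drop-j suffix satisfy the predicate
    have hsub : (s.drop j).countP (fun i => decide (l ≤ i)) = (s.drop j).length := by
      rw [List.countP_eq_length]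
      intro a ha
      rcases List.getElem_of_mem ha with ⟨t, ht, rfl⟩
      have ht' : j + t < s.length := by simp at ht; omega
      rw [List.getElem_drop]
      have : s[j] ≤ s[j + t] := by
        rcases Nat.eq_zero_or_pos t with h0 | h0
        · simp [h0]
        · exact le_of_lt (hmono j (j + t) hjlt ht' (by omega))
      simp; omega
    have hsplit : s.countP (fun i => decide (l ≤ i)) =
        (s.take j).countP (fun i => decide (l ≤ i)) + (s.drop j).countP (fun i => decide (l ≤ i)) := by
      conv_lhs => rw [← List.take_append_drop j s]
      rw [List.countP_append]
    have hdlen : (s.drop j).length = m := by simp; omega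
    omega
  · intro hlt
    have hsplit : s.countP (fun i => decide (l ≤ i)) =
        (s.take (j+1)).countP (fun i => decide (l ≤ i)) + (s.drop (j+1)).countP (fun i => decide (l ≤ i)) := by
      conv_lhs => rw [← List.take_append_drop (j+1) s]
      rw [List.countP_append]
    have htake : (s.take (j+1)).countP (fun i => decide (l ≤ i)) = 0 := by
      rw [List.countP_eq_zero]
      intro a ha
      rcases List.getElem_of_mem ha with ⟨t, ht, rfl⟩
      have htlen : t < j + 1 := lt_of_lt_of_le ht (by simp)
      rw [List.getElem_take]
      have : s[t] ≤ s[j] := by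
        rcases Nat.lt_or_ge t j with h0 | h0
        · exact le_of_lt (hmono t j (by omega) hjlt h0)
        · have : t = j := by omega
          simp [this]
      simp; omega
    have hdle : (s.drop (j+1)).countP (fun i => decide (l ≤ i)) ≤ (s.drop (j+1)).length :=
      List.countP_le_length
    have : (s.drop (j+1)).length = m - 1 := by simp; omega
    omega

theorem pvW_le_iff (arr : List Int) (K : Int) (hK : 0 ≤ K) (r l : Nat) :
    ((pvW arr l (r + 1) (arr.getD r 0) : Int) ≤ K) ↔ pvJump arr K r ≤ l := by
  have hcnt := pvW_eq_countP arr l (arr.getD r 0) (r + 1)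
  simp only [pvJump]
  set s := pvOccs arr (arr.getD r 0) (r + 1) with hs
  by_cases h : K.toNat + 1 ≤ s.length
  · rw [if_pos h]
    have hsorted := pvOccs_sorted arr (arr.getD r 0) (r + 1)
    have := pvSortedCount s (by rw [hs]; exact hsorted) (K.toNat + 1) (by omega) h l
    simp only [Nat.add_sub_cancel] at this
    rw [hcnt]
    omega
  · rw [if_neg h]
    have h2 : (s.countP (fun i => decide (l ≤ i))) ≤ s.length := List.countP_le_length
    constructor
    · intro _; omega
    · intro _; rw [hcnt]; omega

theorem pvJump_le (arr : List Int) (K : Int) (r : Nat) : pvJump arr K r ≤ r + 1 := by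
  simp only [pvJump]
  set s := pvOccs arr (arr.getD r 0) (r + 1) with hs
  by_cases h : K.toNat + 1 ≤ s.length
  · rw [if_pos h]
    have hjlt : s.length - (K.toNat + 1) < s.length := by omega
    rw [List.getD_eq_getElem s 0 hjlt]
    have hmem : s[s.length - (K.toNat + 1)] ∈ s := List.getElem_mem _
    have := pvOccs_mem_lt arr (arr.getD r 0) (r + 1) (s[s.length - (K.toNat + 1)])
      (by rw [← hs]; exact hmem)
    omega
  · rw [if_neg h]; omega

theorem pvSL_le (arr : List Int) (K : Int) : ∀ r, pvSL arr K r ≤ r := by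
  intro r
  induction r with
  | zero => simp [pvSL]
  | succ r ih =>
    simp only [pvSL]
    have := pvJump_le arr K r
    omega

theorem pvW_dec (arr : List Int) (w : Int) (l : Nat) :
    ∀ m, l < m → pvW arr l m w = pvW arr (l + 1) m w + (if arr.getD l 0 = w then 1 else 0) := by
  intro m
  induction m with
  | zero => omega
  | succ m ih =>
    intro h
    rcases Nat.lt_or_ge l m with h1 | h1
    · rw [pvW, pvW, ih h1]
      have e1 : (if l ≤ m ∧ arr.getD m 0 = w then (1 : Nat) else 0)
          = (if l + 1 ≤ m ∧ arr.getD m 0 = w then (1 : Nat) else 0) := by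
        by_cases hc : arr.getD m 0 = w
        · rw [if_pos (show l ≤ m ∧ arr.getD m 0 = w from ⟨by omega, hc⟩),
              if_pos (show l + 1 ≤ m ∧ arr.getD m 0 = w from ⟨by omega, hc⟩)]
        · rw [if_neg (by tauto), if_neg (by tauto)]
      rw [e1]
      omega
    · have hlm : l = m := by omega
      subst hlm
      rw [pvW, pvW]
      rw [pvW_zero_of_ge arr l w l (le_refl l), pvW_zero_of_ge arr (l + 1) w l (by omega)]
      rw [if_neg (show ¬ (l + 1 ≤ l ∧ arr.getD l 0 = w) by omega)]
      by_cases hc2 : arr.getD l 0 = w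
      · rw [if_pos (show l ≤ l ∧ arr.getD l 0 = w from ⟨le_refl l, hc2⟩), if_pos hc2]
      · rw [if_neg (by tauto), if_neg hc2]

-- ---- the while loop computes max l (pvJump) ----

theorem pvAWhile_stop (arr : List Int) (K x : Int) (count : PySem.Dict Int Int) (left : Int)
    (hc : ¬ K < count.getD x 0) : pvAWhile arr K x count left = (count, left) := by
  rw [pvAWhile, if_neg hc]

theorem pvAWhile_step (arr : List Int) (K x : Int) (count : PySem.Dict Int Int) (left : Int)
    (y : Int) (hc : K < count.getD x 0) (h : PySem.List.pyGet? arr left = some y) :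
    pvAWhile arr K x count left = pvAWhile arr K x (count.modify y 0 (· - 1)) (left + 1) := by
  rw [pvAWhile, if_pos hc]
  split
  · next y' hy' =>
    rw [h] at hy'
    injection hy' with e
    subst e
    rfl
  · next hy' => rw [h] at hy'; cases hy'

theorem pvAWhile_spec (arr : List Int) (K : Int) (hK : 0 ≤ K) (r : Nat) (hr : r < arr.length) :
    ∀ (d l : Nat) (count : PySem.Dict Int Int), r + 1 - l ≤ d → l ≤ r + 1 →
    (∀ w, count.getD w 0 = (pvW arr l (r + 1) w : Int)) →
    (pvAWhile arr K (arr.getD r 0) count (l : Int)).2 = ((max l (pvJump arr K r) : Nat) : Int) ∧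
    ∀ w, (pvAWhile arr K (arr.getD r 0) count (l : Int)).1.getD w 0 =
      (pvW arr (max l (pvJump arr K r)) (r + 1) w : Int) := by
  intro d
  induction d with
  | zero =>
    intro l count hd hl hcount
    have hl' : l = r + 1 := by omega
    subst hl'
    have h0 := hcount (arr.getD r 0)
    rw [pvW_zero_of_ge arr (r + 1) (arr.getD r 0) (r + 1) (le_refl _)] at h0
    have hguard : ¬ K < count.getD (arr.getD r 0) 0 := by rw [h0]; push_cast; omega
    rw [pvAWhile_stop arr K _ count _ hguard]
    have hmax : max (r + 1) (pvJump arr K r) = r + 1 := by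
      have := pvJump_le arr K r; omega
    rw [hmax]
    exact ⟨rfl, hcount⟩
  | succ d ihd =>
    intro l count hd hl hcount
    by_cases hc : K < count.getD (arr.getD r 0) 0
    · have hW : (K : Int) < (pvW arr l (r + 1) (arr.getD r 0) : Int) := by
        rw [← hcount]; exact hc
      have hnotle : ¬ pvJump arr K r ≤ l := by
        intro hle
        have := (pvW_le_iff arr K hK r l).2 hle
        omega
      have hjl : l < pvJump arr K r := by omega
      have hjr : pvJump arr K r ≤ r + 1 := pvJump_le arr K r
      have hlen : l < arr.length := by omega
      have hget : PySem.List.pyGet? arr (l : Int) = some arr[l] := by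
        rw [PySem.List.pyGet?_natCast]
        exact List.getElem?_eq_getElem hlen
      rw [pvAWhile_step arr K _ count _ arr[l] hc hget]
      have hgetl : arr.getD l 0 = arr[l] := List.getD_eq_getElem arr 0 hlen
      have hdec := pvW_dec arr
      have hinv : ∀ w, (count.modify arr[l] 0 (· - 1)).getD w 0
          = (pvW arr (l + 1) (r + 1) w : Int) := by
        intro w
        rw [PySem.Dict.getD_modify]
        by_cases hw : w = arr[l]
        · rw [if_pos hw, hcount arr[l]]
          have hd1 := pvW_dec arr arr[l] l (r + 1) (by omega)
          rw [if_pos (hw ▸ hgetl)] at hd1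
          subst hw
          omega
        · rw [if_neg hw, hcount w]
          have hd1 := pvW_dec arr w l (r + 1) (by omega)
          rw [if_neg (by rw [hgetl]; exact fun e => hw e.symm)] at hd1
          omega
      have hcast : (l : Int) + 1 = ((l + 1 : Nat) : Int) := by push_cast; ring
      rw [hcast]
      have hres := ihd (l + 1) (count.modify arr[l] 0 (· - 1)) (by omega) (by omega) hinv
      have hmax : max (l + 1) (pvJump arr K r) = max l (pvJump arr K r) := by omega
      rw [hmax] at hres
      exact hres
    · rw [pvAWhile_stop arr K _ count _ hc]
      have hWle : (pvW arr l (r + 1) (arr.getD r 0) : Int) ≤ K := by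
        rw [← hcount]; omega
      have hle : pvJump arr K r ≤ l := (pvW_le_iff arr K hK r l).1 hWle
      have hmax : max l (pvJump arr K r) = l := by omega
      rw [hmax]
      exact ⟨rfl, hcount⟩

-- ---- port A equals the spec recursion ----

theorem pvFoldA_inv (arr : List Int) (K : Int) (hK : 0 ≤ K) :
    ∀ r, r ≤ arr.length →
    (pvFoldA arr K r).2.1 = pvSM arr K r ∧
    (pvFoldA arr K r).2.2 = ((pvSL arr K r : Nat) : Int) ∧
    ∀ w, (pvFoldA arr K r).1.getD w 0 = (pvW arr (pvSL arr K r) r w : Int) := by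
  intro r
  induction r with
  | zero =>
    intro _
    refine ⟨rfl, rfl, ?_⟩
    intro w
    show PySem.Dict.empty.getD w 0 = ((0 : Nat) : Int)
    rw [PySem.Dict.getD_empty]
    rfl
  | succ r ih =>
    intro hr1
    obtain ⟨ihm, ihl, ihc⟩ := ih (by omega)
    have hstep : pvFoldA arr K (r + 1) = pvStepA arr K (pvFoldA arr K r) (r : Int) := by
      simp [pvFoldA, List.range_succ]
    have hx : PySem.List.pyGetD arr (r : Int) 0 = arr.getD r 0 := by
      simp [PySem.List.pyGetD_natCast]
    have hslr : pvSL arr K r ≤ r := pvSL_le arr K r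
    have hc1 : ∀ w, ((pvFoldA arr K r).1.modify (arr.getD r 0) 0 (· + 1)).getD w 0
        = (pvW arr (pvSL arr K r) (r + 1) w : Int) := by
      intro w
      rw [PySem.Dict.getD_modify, pvW]
      by_cases hw : w = arr.getD r 0
      · rw [if_pos hw, ihc (arr.getD r 0),
          if_pos (show pvSL arr K r ≤ r ∧ arr.getD r 0 = w from ⟨hslr, hw.symm⟩), hw]
        push_cast
        ring
      · rw [if_neg hw, ihc w, if_neg (by exact fun hh => hw hh.2.symm)]
        push_cast
        ring
    have hwhile := pvAWhile_spec arr K hK r (by omega) (r + 1 - pvSL arr K r) (pvSL arr K r)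
      ((pvFoldA arr K r).1.modify (arr.getD r 0) 0 (· + 1)) (le_refl _) (by omega) hc1
    obtain ⟨hw2, hw1⟩ := hwhile
    have hmaxeq : max (pvSL arr K r) (pvJump arr K r) = pvSL arr K (r + 1) := rfl
    rw [hmaxeq] at hw2 hw1
    rw [hstep]
    simp only [pvStepA, hx]
    rw [ihl]
    refine ⟨?_, ?_, ?_⟩
    · show max (pvFoldA arr K r).2.1 _ = pvSM arr K (r + 1)
      rw [ihm, hw2, pvSM]
    · exact hw2
    · exact hw1

theorem pvA_eq (arr : List Int) (K : Int) (hK : 0 ≤ K) :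
    max_length_with_limit arr K = pvSM arr K arr.length := by
  have hrange : PySem.List.pyRange 0 (arr.length : Int) 1
      = (List.range arr.length).map (fun (k : Nat) => (k : Int)) := by
    rw [PySem.List.pyRange_one]
    simp
  show ((PySem.List.pyRange 0 (arr.length : Int) 1).foldl (pvStepA arr K)
      (PySem.Dict.empty, 0, 0)).2.1 = pvSM arr K arr.length
  rw [hrange]
  have h := (pvFoldA_inv arr K hK arr.length (le_refl _)).1
  rw [pvFoldA] at h
  exact h

-- ---- port B equals the spec recursion ----

theorem pvFoldB_inv (arr : List Int) (K : Int) (hK : 0 ≤ K) :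
    ∀ r, r ≤ arr.length →
    (pvFoldB arr K r).2.1 = pvSM arr K r ∧
    (pvFoldB arr K r).2.2 = ((pvSL arr K r : Nat) : Int) ∧
    ∀ w, (pvFoldB arr K r).1.getD w [] = (pvOccs arr w r).map (fun (i : Nat) => (i : Int)) := by
  intro r
  induction r with
  | zero =>
    intro _
    refine ⟨rfl, rfl, ?_⟩
    intro w
    show PySem.Dict.empty.getD w [] = _
    rw [PySem.Dict.getD_empty]
    rfl
  | succ r ih =>
    intro hr1
    obtain ⟨ihm, ihl, ihc⟩ := ih (by omega)
    have hstep : pvFoldB arr K (r + 1) = pvStepB K (pvFoldB arr K r) ((r : Int), arr.getD r 0) := by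
      simp [pvFoldB, List.range_succ]
    set s := pvOccs arr (arr.getD r 0) (r + 1) with hs
    have hp : (pvFoldB arr K r).1.getD (arr.getD r 0) [] ++ [(r : Int)]
        = s.map (fun (i : Nat) => (i : Int)) := by
      rw [ihc, hs, pvOccs_succ, if_pos rfl, List.map_append]
      rfl
    have hleft : (if K < ((((pvFoldB arr K r).1.getD (arr.getD r 0) [] ++ [(r : Int)]).length : Nat) : Int)
        then (PySem.List.pyGet? ((pvFoldB arr K r).1.getD (arr.getD r 0) [] ++ [(r : Int)]) (-(K + 1))).elim
          (pvFoldB arr K r).2.2 (fun q => max (pvFoldB arr K r).2.2 (q + 1))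
        else (pvFoldB arr K r).2.2) = ((pvSL arr K (r + 1) : Nat) : Int) := by
      rw [hp, ihl, List.length_map]
      by_cases hcond : K.toNat + 1 ≤ s.length
      · rw [if_pos (by omega)]
        have hneg : -(K + 1) = -(((K.toNat + 1 : Nat)) : Int) := by push_cast; omega
        rw [hneg, PySem.List.pyGet?_neg_natCast (s.map (fun (i : Nat) => (i : Int))) (K.toNat + 1) (by omega) (by rw [List.length_map]; omega)]
        have hidx : s.length - (K.toNat + 1) < s.length := by omega
        rw [List.getElem?_eq_getElem (by rw [List.length_map]; omega)]
        have hj : pvJump arr K r = s[s.length - (K.toNat + 1)] + 1 := by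
          rw [pvJump, ← hs, if_pos hcond, List.getD_eq_getElem s 0 hidx]
        simp only [Option.elim]
        rw [show pvSL arr K (r + 1) = max (pvSL arr K r) (pvJump arr K r) from rfl, hj]
        rw [List.getElem_map]
        push_cast [List.length_map]
        rfl
      · rw [if_neg (by omega)]
        have hj : pvJump arr K r = 0 := by rw [pvJump, ← hs, if_neg hcond]
        rw [show pvSL arr K (r + 1) = max (pvSL arr K r) (pvJump arr K r) from rfl, hj]
        simp
    rw [hstep]
    simp only [pvStepB]
    rw [hleft]
    refine ⟨?_, rfl, ?_⟩
    · show max (pvFoldB arr K r).2.1 ((r : Int) - ((pvSL arr K (r + 1) : Nat) : Int) + 1)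
          = pvSM arr K (r + 1)
      rw [ihm]
      rfl
    · intro w
      show ((pvFoldB arr K r).1.insert (arr.getD r 0)
          ((pvFoldB arr K r).1.getD (arr.getD r 0) [] ++ [(r : Int)])).getD w [] = _
      rw [hp, PySem.Dict.getD_insert]
      by_cases hw : w = arr.getD r 0
      · rw [if_pos hw, hw, ← hs]
      · rw [if_neg hw, ihc w, pvOccs_succ, if_neg (fun e => hw e.symm)]
        simp

theorem pvB_eq (arr : List Int) (K : Int) (hK : 0 ≤ K) :
    max_length_with_limit_alt arr K = pvSM arr K arr.length := by
  have henum : PySem.List.enumerate arr 0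
      = (List.range arr.length).map (fun (k : Nat) => ((k : Int), arr.getD k 0)) := by
    rw [PySem.List.enumerate_eq_map_pyRange (d := 0), PySem.List.pyRange_one]
    simp [List.map_map, Function.comp_def]
  show ((PySem.List.enumerate arr 0).foldl (pvStepB K) (PySem.Dict.empty, 0, 0)).2.1
      = pvSM arr K arr.length
  rw [henum]
  have h := (pvFoldB_inv arr K hK arr.length (le_refl _)).1
  rw [pvFoldB] at h
  exact h

theorem max_length_with_limit_spec : Claim_equal_max_length_with_limit := by
  intro arr K _ hpre
  unfold Spec_max_length_with_limit
  rcases hpre with h | hK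
  · subst h; rfl
  · rw [pvA_eq arr K hK, pvB_eq arr K hK]
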